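-- pv_equiv track=rewrite | github.com/kdmsit/tipr-first-assignment | src/bayes.py | classPartition
-- ===== SOURCE A (Python) =====
-- def classPartition(trainDataSet,trainLabels):
--     '''
--     :param trainDataSet:
--     :param trainLabels:
--     :return: ClassPartitionSet-A Dict having data-elements of a particular class grouped together.
--     Author: KD
--     Details: This Code Partitions the Train Data as per Class Labels
--     '''
--     ClassPartitionSet={}
--     for i in range(len(trainDataSet)):
--         dataElement=list(trainDataSet[i])
--         dataLabel=trainLabels[i]
--         if(dataLabel!=3):
--             if(dataLabel not in ClassPartitionSet):
--                 ClassPartitionSet[dataLabel]=[]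
--             ClassPartitionSet[dataLabel].append(dataElement)
--     return ClassPartitionSet
-- ===== SOURCE B (Python) =====
-- def classPartition(trainDataSet, trainLabels):
--     # Gather-by-key decomposition: build the filtered (label, element) pair list once,
--     # take the labels in first-seen order, then collect each class by one filter pass.
--     pairs = [(lab, list(el)) for el, lab in zip(trainDataSet, trainLabels) if lab != 3]
--     order = list(dict.fromkeys(lab for lab, _ in pairs))
--     return {lab: [el for l, el in pairs if l == lab] for lab in order}
-- ===== Notes on version B (the rewrite author's own statement) =====
-- stated objective: alternative
-- what changed: Replaces the incremental first-seen dict construction (contains-check, insert-empty, in-place append per element) with a declarative pipeline: one filtered (label, element) pair list, an ordered dedup of the labels, and a per-class gather by filtering the pair list.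
import Mathlib
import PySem

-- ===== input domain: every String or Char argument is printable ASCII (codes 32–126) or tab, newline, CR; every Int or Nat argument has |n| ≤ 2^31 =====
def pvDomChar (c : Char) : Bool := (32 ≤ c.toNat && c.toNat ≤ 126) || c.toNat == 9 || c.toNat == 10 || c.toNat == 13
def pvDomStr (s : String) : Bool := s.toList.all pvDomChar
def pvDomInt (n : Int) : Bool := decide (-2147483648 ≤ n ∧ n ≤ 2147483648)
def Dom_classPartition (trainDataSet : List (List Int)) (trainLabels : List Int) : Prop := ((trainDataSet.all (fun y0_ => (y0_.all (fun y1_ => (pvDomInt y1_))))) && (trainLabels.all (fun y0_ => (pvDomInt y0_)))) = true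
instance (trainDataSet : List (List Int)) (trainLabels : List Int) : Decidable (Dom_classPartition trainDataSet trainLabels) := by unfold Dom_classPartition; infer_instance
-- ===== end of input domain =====

-- B replaces A's incremental first-seen dict construction by a filtered pair list,
-- an ordered dedup of the labels, and a per-class gather pass (alternative decomposition, same cost).


-- ===== PORT A =====
-- literal transliteration: loop over range(len(trainDataSet)); Pre_ guarantees every index is in
-- range for both lists, so pyGetD's defaults are never used on admitted inputs
def classPartition (trainDataSet : List (List Int)) (trainLabels : List Int) : List (Int × List (List Int)) :=
  (List.foldl (fun d i =>
      let dataElement := PySem.List.pyGetD trainDataSet i []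
      let dataLabel := PySem.List.pyGetD trainLabels i 0
      if dataLabel ≠ 3 then
        let d1 := if d.contains dataLabel then d else d.insert dataLabel ([] : List (List Int))
        d1.modify dataLabel [] (fun v => v ++ [dataElement])
      else d)
    PySem.Dict.empty (PySem.List.pyRange 0 (PySem.List.len trainDataSet))).items

-- ===== PORT B =====
def classPartition_alt (trainDataSet : List (List Int)) (trainLabels : List Int) : List (Int × List (List Int)) :=
  let pairs := (trainDataSet.zip trainLabels).filterMap
      (fun p => if p.2 ≠ 3 then some (p.2, p.1) else none)
  let order := PySem.List.dedup (pairs.map (fun q => q.1))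
  order.map (fun k => (k, (pairs.filter (fun q => q.1 == k)).map (fun q => q.2)))

-- ===== PRECONDITION & SPEC =====
-- A raises IndexError on trainLabels[i] when trainLabels is shorter than trainDataSet
def Pre_classPartition (trainDataSet : List (List Int)) (trainLabels : List Int) : Prop :=
  trainDataSet.length ≤ trainLabels.length
instance (trainDataSet : List (List Int)) (trainLabels : List Int) : Decidable (Pre_classPartition trainDataSet trainLabels) := by unfold Pre_classPartition; infer_instance
def pvWitness_classPartition : List (List Int) × List Int := ([[1, 2], [3, 4], [5, 6]], [1, 2, 1])

def Spec_classPartition (trainDataSet : List (List Int)) (trainLabels : List Int) (out : List (Int × List (List Int))) : Prop := out = classPartition_alt trainDataSet trainLabels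
instance (trainDataSet : List (List Int)) (trainLabels : List Int) (out : List (Int × List (List Int))) : Decidable (Spec_classPartition trainDataSet trainLabels out) := by unfold Spec_classPartition; infer_instance

-- ===== CLAIM (what is proved, stated in full; the proofs are below) =====
def Claim_equal_classPartition : Prop := ∀ (trainDataSet : List (List Int)) (trainLabels : List Int), Dom_classPartition trainDataSet trainLabels → Pre_classPartition trainDataSet trainLabels → Spec_classPartition trainDataSet trainLabels (classPartition trainDataSet trainLabels)

-- ===== LEMMAS AND PROOFS =====

-- A's loop body on one (element, label) pair (zeta-reduced form of the port's body)
def stepA (d : PySem.Dict Int (List (List Int))) (e : List Int) (l : Int) : PySem.Dict Int (List (List Int)) :=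
  (if d.contains l then d else d.insert l []).modify l [] (fun v => v ++ [e])

lemma stepA_keys (d : PySem.Dict Int (List (List Int))) (e : List Int) (l : Int) :
    (stepA d e l).keys = PySem.Set.add d.keys l := by
  unfold stepA PySem.Set.add
  by_cases h : d.contains l = true
  · have hl : l ∈ d.keys := (PySem.Dict.contains_iff_mem_keys d l).mp h
    rw [if_pos h, PySem.Dict.keys_modify, PySem.Dict.keys_insert_of_contains _ _ h,
      if_pos (by simpa using hl)]
  · have hl : l ∉ d.keys := fun hm => h ((PySem.Dict.contains_iff_mem_keys d l).mpr hm)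
    rw [if_neg h, PySem.Dict.keys_modify,
      PySem.Dict.keys_insert_of_contains _ _ (PySem.Dict.contains_insert_self d l []),
      PySem.Dict.keys_insert_of_not_contains _ _ (by simpa using h),
      if_neg (by simpa using hl)]

lemma stepA_getD (d : PySem.Dict Int (List (List Int))) (e : List Int) (l k : Int) :
    (stepA d e l).getD k [] = if k = l then d.getD l [] ++ [e] else d.getD k [] := by
  unfold stepA
  by_cases h : d.contains l = true
  · rw [if_pos h, PySem.Dict.getD_modify]
  · rw [if_neg h, PySem.Dict.getD_modify]
    rw [PySem.Dict.getD_of_not_contains d [] (by simpa using h)]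
    by_cases hk : k = l
    · simp [hk]
    · rw [if_neg hk, if_neg hk, PySem.Dict.getD_insert, if_neg hk]

lemma stepA_nodup (d : PySem.Dict Int (List (List Int))) (e : List Int) (l : Int)
    (h : d.keys.Nodup) : (stepA d e l).keys.Nodup := by
  rw [stepA_keys]; exact PySem.Set.nodup_add _ _ h

-- grouping invariant: the dict built by repeated stepA, read as items
lemma group_items (r : List (List Int × Int)) :
    ∀ (d : PySem.Dict Int (List (List Int))), d.keys.Nodup →
      (List.foldl (fun d p => stepA d p.1 p.2) d r).items
        = (PySem.Set.update d.keys (r.map (fun p => p.2))).map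
            (fun k => (k, d.getD k [] ++ (r.filter (fun p => p.2 == k)).map (fun p => p.1))) := by
  induction r with
  | nil =>
    intro d hd
    simpa [PySem.Set.update] using PySem.Dict.items_eq_map_keys d hd []
  | cons p r ih =>
    intro d hd
    rcases p with ⟨e, l⟩
    simp only [List.foldl_cons, List.map_cons]
    rw [ih (stepA d e l) (stepA_nodup d e l hd), stepA_keys]
    have hupd : PySem.Set.update (PySem.Set.add d.keys l) (r.map (fun p => p.2))
        = PySem.Set.update d.keys (l :: r.map (fun p => p.2)) := by
      simp [PySem.Set.update]
    rw [hupd]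
    apply List.map_congr_left
    intro k _
    rw [stepA_getD]
    by_cases hk : k = l
    · subst hk
      simp [List.filter_cons]
    · have : ((l : Int) == k) = false := by simp [Ne.symm hk]
      simp [List.filter_cons, this, if_neg hk]

-- A's fold over range(len ds) with both indexings equals a fold over the zip
lemma foldl_range_pair {St : Type} (g : St → List Int → Int → St)
    (ds : List (List Int)) (ls : List Int) (init : St) (h : ds.length ≤ ls.length) :
    List.foldl (fun d i => g d (PySem.List.pyGetD ds i []) (PySem.List.pyGetD ls i 0)) init
        (PySem.List.pyRange 0 (PySem.List.len ds))
      = List.foldl (fun d p => g d p.1 p.2) init (ds.zip ls) := by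
  have hlen : PySem.List.len ds = PySem.List.len (ds.zip ls) := by
    simp [PySem.List.len, List.length_zip]; omega
  rw [hlen]
  have hcong : List.foldl (fun d i => g d (PySem.List.pyGetD ds i []) (PySem.List.pyGetD ls i 0)) init
      (PySem.List.pyRange 0 (PySem.List.len (ds.zip ls)))
    = List.foldl (fun acc j =>
        (fun d p => g d p.1 p.2) acc (PySem.List.pyGetD (ds.zip ls) j ([], 0))) init
      (PySem.List.pyRange 0 (PySem.List.len (ds.zip ls))) := by
    apply PySem.List.foldl_congr_mem
    intro acc x hx
    rw [PySem.List.mem_pyRange_one] at hx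
    obtain ⟨h0, h1⟩ := hx
    have hz : (ds.zip ls).length = ds.length := by simp [List.length_zip]; omega
    have h1' : x < ((ds.zip ls).length : Int) := by simpa [PySem.List.len] using h1
    have hxd : x < (ds.length : Int) := by omega
    have hxl : x < (ls.length : Int) := by
      have : (ds.length : Int) ≤ (ls.length : Int) := by exact_mod_cast h
      omega
    rw [PySem.List.pyGetD_eq_getElem _ _ h0 hxd, PySem.List.pyGetD_eq_getElem _ _ h0 hxl,
      PySem.List.pyGetD_eq_getElem _ _ h0 h1']
    simp [List.getElem_zip]
  rw [hcong]
  simpa using PySem.List.foldl_pyRange_pyGetD (a := 0) (ds.zip ls) ([], 0)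
    (fun d p => g d p.1 p.2) init (by norm_num)

lemma filterMap_pairs (l : List (List Int × Int)) :
    l.filterMap (fun p => if p.2 ≠ 3 then some (p.2, p.1) else none)
      = (l.filter (fun p => decide (p.2 ≠ 3))).map (fun p => (p.2, p.1)) := by
  induction l with
  | nil => rfl
  | cons x t ih =>
    by_cases hx : x.2 = 3
    · simpa [List.filterMap_cons, List.filter_cons, hx] using ih
    · simpa [List.filterMap_cons, List.filter_cons, hx] using ih

-- ===== VERDICT (by name: the statement is the Claim_ definition above) =====
theorem classPartition_spec : Claim_equal_classPartition := by
  intro ds ls _ hpre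
  unfold Spec_classPartition classPartition classPartition_alt
  rw [foldl_range_pair (fun d e l =>
      if l ≠ 3 then
        (if d.contains l then d else d.insert l ([] : List (List Int))).modify l [] (fun v => v ++ [e])
      else d) ds ls PySem.Dict.empty hpre]
  have hbody : (fun (d : PySem.Dict Int (List (List Int))) (p : List Int × Int) =>
      if p.2 ≠ 3 then
        (if d.contains p.2 then d else d.insert p.2 ([] : List (List Int))).modify p.2 [] (fun v => v ++ [p.1])
      else d)
    = fun d p => if p.2 ≠ 3 then stepA d p.1 p.2 else d := by
    funext d p; rfl
  rw [hbody, PySem.List.foldl_ite_eq_foldl_filter (fun p => p.2 ≠ 3)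
      (fun d p => stepA d p.1 p.2) (ds.zip ls) PySem.Dict.empty]
  rw [group_items _ PySem.Dict.empty PySem.Dict.nodup_keys_empty]
  rw [filterMap_pairs]
  simp only [List.map_map, List.filter_map, PySem.Dict.keys_empty, PySem.Dict.getD_empty,
    List.nil_append, PySem.List.dedup_eq_ofList]
  have hset : PySem.Set.update ([] : PySem.Set Int)
        (((ds.zip ls).filter (fun p => decide (p.2 ≠ 3))).map (fun p => p.2))
      = PySem.Set.ofList
        (((ds.zip ls).filter (fun p => decide (p.2 ≠ 3))).map ((fun q => q.1) ∘ (fun p => (p.2, p.1)))) := by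
    rfl
  rw [hset]
  apply List.map_congr_left
  intro k _
  simp [Function.comp]
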